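-- pv_equiv track=rewrite | github.com/NicholasJacob1990/iudex0 | iudex_mvp_fast/app/services/chunk_expander.py | _get_neighbor_indices
-- ===== SOURCE A (Python) =====
-- from typing import Any, Callable, Dict, List, Optional, Set, Tuple
--
-- def _get_neighbor_indices(
--
--     center: int,
--     window: int,
--     total: Optional[int] = None,
-- ) -> List[int]:
--     """
--     Calculate neighbor indices for a given center position.
--
--     Returns indices in order: center, center-1, center+1, center-2, center+2, ...
--     """
--     indices = []
--     for offset in range(1, window + 1):
--         before = center - offset
--         after = center + offset
--
--         if before >= 0:
--             indices.append(before)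
--         if total is None or after < total:
--             indices.append(after)
--
--     return indices
-- ===== SOURCE B (Python) =====
-- from typing import List, Optional
--
--
-- def _get_neighbor_indices(
--     center: int,
--     window: int,
--     total: Optional[int] = None,
-- ) -> List[int]:
--     # Each side of the window is a contiguous range: interleave them pairwise.
--     befores = list(range(center - 1, max(center - window, 0) - 1, -1))
--     hi = center + window if total is None else min(center + window, total - 1)
--     afters = list(range(center + 1, hi + 1))
--     k = min(len(befores), len(afters))
--     out = []
--     for b, a in zip(befores[:k], afters[:k]):
--         out.append(b)
--         out.append(a)
--     return out + befores[k:] + afters[k:]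
-- ===== Notes on version B (the rewrite author's own statement) =====
-- stated objective: alternative
-- what changed: Replaces the per-offset loop with two conditional appends by precomputing the two contiguous neighbor ranges (descending befores, ascending capped afters) and interleaving them pairwise with zip plus the leftover tail.
import Mathlib
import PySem

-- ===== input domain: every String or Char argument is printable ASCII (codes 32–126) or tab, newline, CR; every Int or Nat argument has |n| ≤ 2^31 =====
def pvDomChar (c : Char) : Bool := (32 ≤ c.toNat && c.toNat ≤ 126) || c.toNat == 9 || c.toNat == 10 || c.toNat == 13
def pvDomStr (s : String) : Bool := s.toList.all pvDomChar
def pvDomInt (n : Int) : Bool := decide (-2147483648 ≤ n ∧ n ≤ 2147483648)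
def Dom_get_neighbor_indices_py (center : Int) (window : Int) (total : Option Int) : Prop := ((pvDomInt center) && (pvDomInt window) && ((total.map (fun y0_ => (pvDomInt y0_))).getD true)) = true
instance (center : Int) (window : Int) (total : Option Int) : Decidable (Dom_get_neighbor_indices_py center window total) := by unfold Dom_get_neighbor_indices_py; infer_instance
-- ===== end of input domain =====

-- B interleaves the two precomputed contiguous neighbor ranges instead of testing each offset; same values, alternative decomposition.

-- ===== PORT A =====
def get_neighbor_indices_py (center : Int) (window : Int) (total : Option Int) : List Int :=
  (PySem.List.pyRange 1 (window + 1) 1).foldl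
    (fun indices offset =>
      let before := center - offset
      let after := center + offset
      let indices := if 0 ≤ before then indices ++ [before] else indices
      if (match total with | none => true | some t => decide (after < t)) = true
        then indices ++ [after] else indices)
    []

-- ===== PORT B =====
def get_neighbor_indices_py_alt (center : Int) (window : Int) (total : Option Int) : List Int :=
  let befores := PySem.List.pyRange (center - 1) (max (center - window) 0 - 1) (-1)
  let hi := match total with
    | none => center + window
    | some t => min (center + window) (t - 1)
  let afters := PySem.List.pyRange (center + 1) (hi + 1) 1
  let k := min befores.length afters.length
  ((befores.take k).zip (afters.take k)).foldl (fun out p => out ++ [p.1, p.2]) []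
    ++ befores.drop k ++ afters.drop k

-- ===== PRECONDITION & SPEC =====
def Spec_get_neighbor_indices_py (center : Int) (window : Int) (total : Option Int) (out : List Int) : Prop := out = get_neighbor_indices_py_alt center window total
instance (center : Int) (window : Int) (total : Option Int) (out : List Int) : Decidable (Spec_get_neighbor_indices_py center window total out) := by unfold Spec_get_neighbor_indices_py; infer_instance

-- ===== CLAIM (what is proved, stated in full; the proofs are below) =====
def Claim_equal_get_neighbor_indices_py : Prop := ∀ (center : Int) (window : Int) (total : Option Int), Dom_get_neighbor_indices_py center window total → Spec_get_neighbor_indices_py center window total (get_neighbor_indices_py center window total)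

-- ===== LEMMAS AND PROOFS =====

-- one conditional side emission: [f o] when p o, else nothing
def pvSide (p : Int → Bool) (f : Int → Int) (o : Int) : List Int :=
  if p o then [f o] else []

-- pairwise interleaving of two lists
def pvInterleave : List Int → List Int → List Int
  | [], ys => ys
  | xs, [] => xs
  | x :: xs, y :: ys => x :: y :: pvInterleave xs ys

lemma pvInterleave_nil_left (ys : List Int) : pvInterleave [] ys = ys := by
  cases ys <;> rfl

lemma pvInterleave_nil_right (xs : List Int) : pvInterleave xs [] = xs := by
  cases xs <;> rfl

lemma pvInterleave_cons_cons (x y : Int) (xs ys : List Int) :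
    pvInterleave (x :: xs) (y :: ys) = x :: y :: pvInterleave xs ys := rfl

lemma pvSide_all_false (p : Int → Bool) (f : Int → Int) (l : List Int)
    (h : ∀ o ∈ l, p o = false) : l.flatMap (pvSide p f) = [] := by
  induction l with
  | nil => rfl
  | cons a t ih =>
      simp only [List.flatMap_cons, pvSide, h a (by simp), ih (fun o ho => h o (by simp [ho]))]
      rfl

lemma pvFlatMap_congr {α : Type} (l : List α) (f g : α → List Int)
    (h : ∀ o ∈ l, f o = g o) : l.flatMap f = l.flatMap g := by
  induction l with
  | nil => rfl
  | cons a t ih =>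
      simp only [List.flatMap_cons, h a (by simp), ih (fun o ho => h o (by simp [ho]))]

-- interleaving two monotone-prefix sides equals emitting both per offset
lemma pvInterleave_range (pB pC : Int → Bool) (fB fC : Int → Int)
    (hB : ∀ o o' : Int, o ≤ o' → pB o' = true → pB o = true)
    (hC : ∀ o o' : Int, o ≤ o' → pC o' = true → pC o = true) :
    ∀ (n : Nat) (a b : Int), b - a ≤ n →
      (PySem.List.pyRange a b 1).flatMap (fun o => pvSide pB fB o ++ pvSide pC fC o)
        = pvInterleave ((PySem.List.pyRange a b 1).flatMap (pvSide pB fB))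
                       ((PySem.List.pyRange a b 1).flatMap (pvSide pC fC)) := by
  intro n
  induction n with
  | zero =>
      intro a b h
      rw [PySem.List.pyRange_one_eq_nil (by omega)]
      rfl
  | succ n ih =>
      intro a b h
      by_cases hab : b ≤ a
      · rw [PySem.List.pyRange_one_eq_nil hab]; rfl
      · rw [PySem.List.pyRange_one_cons (by omega)]
        have htail := ih (a + 1) b (by omega)
        have hmem : ∀ o ∈ PySem.List.pyRange (a + 1) b 1, a ≤ o := by
          intro o ho
          have := (PySem.List.mem_pyRange_one.mp ho).1
          omega
        cases hpB : pB a <;> cases hpC : pC a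
        · -- both false: everything empty
          have hBf : ∀ o ∈ PySem.List.pyRange (a + 1) b 1, pB o = false := by
            intro o ho
            by_contra hc
            exact absurd (hB a o (hmem o ho) (by simpa using hc)) (by simp [hpB])
          have hCf : ∀ o ∈ PySem.List.pyRange (a + 1) b 1, pC o = false := by
            intro o ho
            by_contra hc
            exact absurd (hC a o (hmem o ho) (by simpa using hc)) (by simp [hpC])
          have h1 : (PySem.List.pyRange (a + 1) b 1).flatMap (fun o => pvSide pB fB o ++ pvSide pC fC o) = [] := by
            rw [pvFlatMap_congr _ _ (fun _ => ([] : List Int)) (fun o ho => by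
              simp [pvSide, hBf o ho, hCf o ho])]
            simp
          rw [List.flatMap_cons, h1, List.flatMap_cons, pvSide_all_false pB fB _ hBf,
            List.flatMap_cons, pvSide_all_false pC fC _ hCf]
          simp [pvSide, hpB, hpC, pvInterleave_nil_left]
        · -- pB false, pC true: B side empty for the whole tail
          have hBf : ∀ o ∈ PySem.List.pyRange (a + 1) b 1, pB o = false := by
            intro o ho
            by_contra hc
            exact absurd (hB a o (hmem o ho) (by simpa using hc)) (by simp [hpB])
          have h1 : (PySem.List.pyRange (a + 1) b 1).flatMap (fun o => pvSide pB fB o ++ pvSide pC fC o)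
              = (PySem.List.pyRange (a + 1) b 1).flatMap (pvSide pC fC) := by
            rw [pvFlatMap_congr _ _ (pvSide pC fC) (fun o ho => by
              simp [pvSide, hBf o ho])]
          rw [List.flatMap_cons, h1, List.flatMap_cons, pvSide_all_false pB fB _ hBf,
            List.flatMap_cons]
          simp [pvSide, hpB, hpC, pvInterleave_nil_left]
        · -- pB true, pC false: C side empty for the whole tail
          have hCf : ∀ o ∈ PySem.List.pyRange (a + 1) b 1, pC o = false := by
            intro o ho
            by_contra hc
            exact absurd (hC a o (hmem o ho) (by simpa using hc)) (by simp [hpC])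
          have h1 : (PySem.List.pyRange (a + 1) b 1).flatMap (fun o => pvSide pB fB o ++ pvSide pC fC o)
              = (PySem.List.pyRange (a + 1) b 1).flatMap (pvSide pB fB) := by
            rw [pvFlatMap_congr _ _ (pvSide pB fB) (fun o ho => by
              simp [pvSide, hCf o ho])]
          rw [List.flatMap_cons, h1, List.flatMap_cons, List.flatMap_cons,
            pvSide_all_false pC fC _ hCf]
          simp [pvSide, hpB, hpC, pvInterleave_nil_right]
        · -- both true
          rw [List.flatMap_cons, htail, List.flatMap_cons, List.flatMap_cons]
          simp [pvSide, hpB, hpC, pvInterleave_cons_cons]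

-- A's foldl, rewritten as a flatMap of per-offset emissions
lemma pyA_flat (center window : Int) (total : Option Int) :
    get_neighbor_indices_py center window total
      = (PySem.List.pyRange 1 (window + 1) 1).flatMap
          (fun o => pvSide (fun o => decide (0 ≤ center - o)) (fun o => center - o) o
            ++ pvSide (fun o => match total with | none => true | some t => decide (center + o < t)) (fun o => center + o) o) := by
  unfold get_neighbor_indices_py
  have key : ∀ (l : List Int) (acc : List Int),
      l.foldl (fun indices offset =>
        let before := center - offset
        let after := center + offset
        let indices := if 0 ≤ before then indices ++ [before] else indices
        if (match total with | none => true | some t => decide (after < t)) = true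
          then indices ++ [after] else indices) acc
      = acc ++ l.flatMap (fun o => pvSide (fun o => decide (0 ≤ center - o)) (fun o => center - o) o
            ++ pvSide (fun o => match total with | none => true | some t => decide (center + o < t)) (fun o => center + o) o) := by
    intro l
    induction l with
    | nil => intro acc; simp
    | cons a t ih =>
        intro acc
        rw [List.foldl_cons, ih]
        simp only [pvSide, List.flatMap_cons]
        split_ifs <;> simp_all <;> omega
  rw [key]
  simp

-- the flatMap of the before-side is B's descending range
-- generic: flatMap of a side = filter then map
lemma flatMap_side (p : Int → Bool) (f : Int → Int) (l : List Int) :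
    l.flatMap (pvSide p f) = (l.filter p).map f := by
  induction l with
  | nil => rfl
  | cons a t ih =>
      simp only [List.flatMap_cons, List.filter_cons, pvSide]
      cases h : p a <;> simp [ih]

-- filter of an ascending unit range by an upper bound is a truncated range
lemma filter_range_le (c : Int) :
    ∀ (n : Nat) (a b : Int), b - a ≤ n →
      (PySem.List.pyRange a b 1).filter (fun o => decide (o ≤ c))
        = PySem.List.pyRange a (min b (c + 1)) 1 := by
  intro n
  induction n with
  | zero =>
      intro a b h
      rw [PySem.List.pyRange_one_eq_nil (by omega), PySem.List.pyRange_one_eq_nil (by omega)]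
      rfl
  | succ n ih =>
      intro a b h
      by_cases hab : b ≤ a
      · rw [PySem.List.pyRange_one_eq_nil hab, PySem.List.pyRange_one_eq_nil (by omega)]
        rfl
      · rw [PySem.List.pyRange_one_cons (by omega), List.filter_cons]
        by_cases hac : a ≤ c
        · rw [PySem.List.pyRange_one_cons (show a < min b (c + 1) by omega)]
          simp only [hac, decide_true, if_true]
          rw [ih (a + 1) b (by omega)]
        · have h1 : (PySem.List.pyRange (a + 1) b 1).filter (fun o => decide (o ≤ c)) = [] := by
            rw [List.filter_eq_nil_iff.mpr]
            intro o ho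
            have := (PySem.List.mem_pyRange_one.mp ho).1
            simp; omega
          rw [PySem.List.pyRange_one_eq_nil (show min b (c + 1) ≤ a by omega)]
          simp [hac, h1]
  -- (bound n is arbitrary; instantiated with (b-a).toNat at use sites)

lemma befores_eq (center window : Int) :
    PySem.List.pyRange (center - 1) (max (center - window) 0 - 1) (-1)
      = (PySem.List.pyRange 1 (window + 1) 1).flatMap
          (pvSide (fun o => decide (0 ≤ center - o)) (fun o => center - o)) := by
  rw [flatMap_side]
  have hfc : (PySem.List.pyRange 1 (window + 1) 1).filter (fun o => decide (0 ≤ center - o))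
      = (PySem.List.pyRange 1 (window + 1) 1).filter (fun o => decide (o ≤ center)) := by
    apply List.filter_congr
    intro o _
    simp only [decide_eq_decide]
    omega
  rw [hfc, filter_range_le center (window + 1 - 1).toNat 1 (window + 1) (by omega)]
  rw [PySem.List.pyRange_neg_one, PySem.List.pyRange_one, List.map_map]
  have hlen : (center - 1 - (max (center - window) 0 - 1)).toNat
      = (min (window + 1) (center + 1) - 1).toNat := by omega
  rw [hlen]
  apply List.map_congr_left
  intro k _
  simp [Function.comp]
  omega

lemma afters_eq_none (center window : Int) :
    PySem.List.pyRange (center + 1) (center + window + 1) 1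
      = (PySem.List.pyRange 1 (window + 1) 1).flatMap
          (pvSide (fun _ => true) (fun o => center + o)) := by
  rw [flatMap_side]
  simp only [List.filter_true]
  rw [PySem.List.pyRange_one, PySem.List.pyRange_one, List.map_map]
  have : (center + window + 1 - (center + 1)).toNat = (window + 1 - 1).toNat := by omega
  rw [this]
  apply List.map_congr_left
  intro k _
  simp [Function.comp]
  omega

lemma afters_eq_some (center window t : Int) :
    PySem.List.pyRange (center + 1) (min (center + window) (t - 1) + 1) 1
      = (PySem.List.pyRange 1 (window + 1) 1).flatMap
          (pvSide (fun o => decide (center + o < t)) (fun o => center + o)) := by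
  rw [flatMap_side]
  have hfc : (PySem.List.pyRange 1 (window + 1) 1).filter (fun o => decide (center + o < t))
      = (PySem.List.pyRange 1 (window + 1) 1).filter (fun o => decide (o ≤ t - center - 1)) := by
    apply List.filter_congr
    intro o _
    simp only [decide_eq_decide]
    omega
  rw [hfc, filter_range_le (t - center - 1) (window + 1 - 1).toNat 1 (window + 1) (by omega)]
  rw [PySem.List.pyRange_one, PySem.List.pyRange_one, List.map_map]
  have : (min (center + window) (t - 1) + 1 - (center + 1)).toNat
      = (min (window + 1) (t - center - 1 + 1) - 1).toNat := by omega
  rw [this]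
  apply List.map_congr_left
  intro k _
  simp [Function.comp]
  omega

-- appending-pairs fold as a flatMap
lemma pvFoldlPairs : ∀ (zs : List (Int × Int)) (acc : List Int),
    zs.foldl (fun out p => out ++ [p.1, p.2]) acc = acc ++ zs.flatMap (fun p => [p.1, p.2]) := by
  intro zs
  induction zs with
  | nil => intro acc; simp
  | cons z t ih => intro acc; rw [List.foldl_cons, ih]; simp

-- B's zip-and-tails construction computes pvInterleave
lemma zip_interleave :
    ∀ (xs ys : List Int),
      ((xs.take (min xs.length ys.length)).zip (ys.take (min xs.length ys.length))).foldl
          (fun out p => out ++ [p.1, p.2]) []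
        ++ xs.drop (min xs.length ys.length) ++ ys.drop (min xs.length ys.length)
      = pvInterleave xs ys := by
  intro xs
  induction xs with
  | nil => intro ys; simp [pvInterleave_nil_left]
  | cons x xs ih =>
      intro ys
      cases ys with
      | nil => simp [pvInterleave_nil_right]
      | cons y ys =>
          have hm : min (x :: xs).length (y :: ys).length = min xs.length ys.length + 1 := by
            simp [Nat.succ_min_succ]
          rw [hm]
          simp only [List.take_succ_cons, List.zip_cons_cons, List.drop_succ_cons]
          rw [pvInterleave_cons_cons, ← ih ys, pvFoldlPairs, pvFoldlPairs]
          simp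

-- ===== VERDICT (by name: the statement is the Claim_ definition above) =====
theorem get_neighbor_indices_py_spec : Claim_equal_get_neighbor_indices_py := by
  intro center window total _
  unfold Spec_get_neighbor_indices_py
  rw [pyA_flat]
  unfold get_neighbor_indices_py_alt
  cases total with
  | none =>
      simp only []
      rw [zip_interleave, befores_eq, afters_eq_none]
      exact pvInterleave_range _ _ _ _
        (fun o o' h hp => by simp at *; omega)
        (fun o o' h hp => by simp)
        (window + 1 - 1).toNat 1 (window + 1) (by omega)
  | some t =>
      simp only []
      rw [zip_interleave, befores_eq, afters_eq_some]
      exact pvInterleave_range _ _ _ _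
        (fun o o' h hp => by simp at *; omega)
        (fun o o' h hp => by simp at *; omega)
        (window + 1 - 1).toNat 1 (window + 1) (by omega)
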